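-- pv_equiv track=rewrite | github.com/yasufumi-nakata/Pytra | tools/prepare_selfhost_source_cs.py | _remove_first_import_with_prefix
-- ===== SOURCE A (Python) =====
-- def _remove_first_import_with_prefix(src: str, prefix: str) -> tuple[str, bool]:
--     lines = src.splitlines(keepends=True)
--     out_lines: list[str] = []
--     removed = False
--     skipping_block = False
--     paren_depth = 0
--     for line in lines:
--         if skipping_block:
--             paren_depth += line.count("(") - line.count(")")
--             if paren_depth <= 0:
--                 skipping_block = False
--             continue
--         if (not removed) and line.startswith(prefix):
--             removed = True
--             paren_depth = line.count("(") - line.count(")")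
--             if paren_depth > 0:
--                 skipping_block = True
--             continue
--         out_lines.append(line)
--     return "".join(out_lines), removed
-- ===== SOURCE B (Python) =====
-- def _remove_first_import_with_prefix(src: str, prefix: str) -> tuple[str, bool]:
--     lines = src.splitlines(keepends=True)
--     i = next((k for k, ln in enumerate(lines) if ln.startswith(prefix)), None)
--     if i is None:
--         return src, False
--     depth = lines[i].count("(") - lines[i].count(")")
--     j = i
--     while depth > 0 and j + 1 < len(lines):
--         j += 1
--         depth += lines[j].count("(") - lines[j].count(")")
--     return "".join(lines[:i] + lines[j + 1:]), True
-- ===== Notes on version B (the rewrite author's own statement) =====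
-- stated objective: simpler
-- what changed: Replaces A's single-pass flag-driven state machine (removed/skipping_block/paren_depth flags threaded through one accumulating loop) by a find-then-splice decomposition: find the first matching line, walk forward to measure the parenthesized block's extent, then join the list with that slice removed.
import Mathlib
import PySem

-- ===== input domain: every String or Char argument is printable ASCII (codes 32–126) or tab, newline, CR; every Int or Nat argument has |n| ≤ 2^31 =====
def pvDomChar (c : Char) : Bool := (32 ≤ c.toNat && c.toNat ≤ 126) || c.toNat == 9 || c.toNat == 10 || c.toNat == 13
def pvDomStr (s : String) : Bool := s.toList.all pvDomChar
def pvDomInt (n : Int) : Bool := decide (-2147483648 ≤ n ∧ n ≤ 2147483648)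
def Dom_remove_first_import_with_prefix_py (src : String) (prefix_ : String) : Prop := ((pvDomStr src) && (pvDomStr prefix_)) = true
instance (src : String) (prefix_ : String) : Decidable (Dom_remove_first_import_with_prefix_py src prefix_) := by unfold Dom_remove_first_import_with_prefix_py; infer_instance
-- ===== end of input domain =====

-- B replaces A's flag-driven accumulating state machine by a find-then-splice decomposition
-- (find the first matching line, measure the block's extent, splice the list); objective: simpler.

-- src.splitlines(keepends=True), ported by hand (PySem has only keepends=False):
-- exact on the stated domain (whose only line boundaries are "\n", "\r\n", "\r"); shared by both ports.
def pvSplitKeepAux (acc : List Char) : List Char → List (List Char)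
  | [] => if acc = [] then [] else [acc.reverse]
  | '\r' :: '\n' :: rest => (acc.reverse ++ ['\r', '\n']) :: pvSplitKeepAux [] rest
  | c :: rest =>
    if c = '\n' then (acc.reverse ++ ['\n']) :: pvSplitKeepAux [] rest
    else if c = '\r' then (acc.reverse ++ ['\r']) :: pvSplitKeepAux [] rest
    else pvSplitKeepAux (c :: acc) rest

def pvSplitKeep (cs : List Char) : List (List Char) := pvSplitKeepAux [] cs

-- line.count("(") - line.count(")") : Int, shared by both ports (identical in both Pythons)
def pvBal (l : List Char) : Int := (PySem.Chars.count l ['('] : Int) - (PySem.Chars.count l [')'] : Int)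

-- ===== PORT A =====
-- A's per-line state machine: state = (out_lines, removed, skipping_block, paren_depth)
def pvStepA (p : List Char) (st : List (List Char) × Bool × Bool × Int) (line : List Char) :
    List (List Char) × Bool × Bool × Int :=
  let (out, removed, skipping, depth) := st
  if skipping then
    let d := depth + pvBal line
    (out, removed, !(d ≤ 0), d)
  else if !removed && PySem.Chars.startswith line p then
    let d := pvBal line
    (out, true, decide (0 < d), d)
  else (out ++ [line], removed, skipping, depth)

def remove_first_import_with_prefix_py (src : String) (prefix_ : String) : String × Bool :=
  let lines := pvSplitKeep src.toList
  let st := lines.foldl (pvStepA prefix_.toList) ([], false, false, 0)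
  (String.ofList (PySem.Chars.join [] st.1), st.2.1)

-- ===== PORT B =====
-- the while-loop of Source B: j advances while depth > 0 and lines remain; returns the last consumed index
def pvBlockEnd (depth : Int) (j : Nat) : List (List Char) → Nat
  | [] => j
  | l :: rest => if 0 < depth then pvBlockEnd (depth + pvBal l) (j + 1) rest else j

def remove_first_import_with_prefix_py_alt (src : String) (prefix_ : String) : String × Bool :=
  let lines := pvSplitKeep src.toList
  match lines.findIdx? (fun l => PySem.Chars.startswith l prefix_.toList) with
  | none => (src, false)
  | some i =>
    let depth := pvBal (lines.getD i [])
    let j := pvBlockEnd depth i (lines.drop (i + 1))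
    (String.ofList (PySem.Chars.join [] (lines.take i ++ lines.drop (j + 1))), true)

-- ===== PRECONDITION & SPEC =====
def Spec_remove_first_import_with_prefix_py (src : String) (prefix_ : String) (out : String × Bool) : Prop := out = remove_first_import_with_prefix_py_alt src prefix_
instance (src : String) (prefix_ : String) (out : String × Bool) : Decidable (Spec_remove_first_import_with_prefix_py src prefix_ out) := by unfold Spec_remove_first_import_with_prefix_py; infer_instance

-- ===== CLAIM (what is proved, stated in full; the proofs are below) =====
def Claim_equal_remove_first_import_with_prefix_py : Prop := ∀ (src : String) (prefix_ : String), Dom_remove_first_import_with_prefix_py src prefix_ → Spec_remove_first_import_with_prefix_py src prefix_ (remove_first_import_with_prefix_py src prefix_)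

-- ===== LEMMAS AND PROOFS =====

-- "".join with empty separator is flatten
theorem pv_join_nil_eq_flatten (parts : List (List Char)) :
    PySem.Chars.join [] parts = parts.flatten := by
  induction parts with
  | nil => rfl
  | cons l rest ih =>
    cases rest with
    | nil => simp [PySem.Chars.join, List.intercalate, List.intersperse]
    | cons m rest' =>
      simp only [PySem.Chars.join] at ih
      simpa [PySem.Chars.join, List.intercalate, List.intersperse, ih] using ih

-- splitlines(keepends=True) concatenates back to the source
theorem pv_splitKeepAux_flatten (acc : List Char) (cs : List Char) :
    (pvSplitKeepAux acc cs).flatten = acc.reverse ++ cs := by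
  induction acc, cs using pvSplitKeepAux.induct <;> simp_all [pvSplitKeepAux]

theorem pv_splitKeep_flatten (cs : List Char) : (pvSplitKeep cs).flatten = cs := by
  simpa using pv_splitKeepAux_flatten [] cs

-- pvBlockEnd only shifts its index accumulator
theorem pvBlockEnd_shift (ls : List (List Char)) : ∀ d j k,
    pvBlockEnd d (j + k) ls = pvBlockEnd d j ls + k := by
  induction ls with
  | nil => intro d j k; rfl
  | cons l rest ih =>
    intro d j k
    by_cases h : 0 < d
    · simpa [pvBlockEnd, h, Nat.add_right_comm j k 1] using ih (d + pvBal l) (j + 1) k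
    · simp [pvBlockEnd, h]

-- A's loop once removed and not skipping: appends every remaining line
theorem pvA_done (p : List Char) (ls : List (List Char)) : ∀ out sk d, sk = false →
    ls.foldl (pvStepA p) (out, true, sk, d) = (out ++ ls, true, sk, d) := by
  induction ls with
  | nil => intro out sk d _; simp
  | cons l rest ih =>
    intro out sk d hsk
    subst hsk
    simp only [List.foldl_cons, pvStepA, Bool.not_true, Bool.false_and, if_false,
      Bool.false_eq_true]
    simpa using ih (out ++ [l]) false d rfl

-- A's skipping loop consumes exactly through pvBlockEnd and appends the rest
theorem pvA_skip (p : List Char) (ls : List (List Char)) : ∀ out d, 0 < d →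
    (ls.foldl (pvStepA p) (out, true, true, d)).1 = out ++ ls.drop (pvBlockEnd d 0 ls) ∧
    (ls.foldl (pvStepA p) (out, true, true, d)).2.1 = true := by
  induction ls with
  | nil => intro out d _; simp
  | cons l rest ih =>
    intro out d hd
    have hpos : (0 < d) = True := by simp [hd]
    simp only [List.foldl_cons, pvStepA]
    by_cases h : d + pvBal l ≤ 0
    · have hne : ¬ (0 < d + pvBal l) := by omega
      have := pvA_done p rest (out) false (d + pvBal l) rfl
      simp [h, this, pvBlockEnd, hd,
        show pvBlockEnd (d + pvBal l) 1 rest = 1 from by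
          cases rest with
          | nil => rfl
          | cons m r => simp [pvBlockEnd, hne]]
    · have hpos' : 0 < d + pvBal l := by omega
      have := ih out (d + pvBal l) hpos'
      have hsh : pvBlockEnd (d + pvBal l) 1 rest = pvBlockEnd (d + pvBal l) 0 rest + 1 := by
        simpa using pvBlockEnd_shift rest (d + pvBal l) 0 1
      simp [h, this, pvBlockEnd, hd, hsh]

-- The main correspondence between A's fold and B's find-then-splice, on the split line list
theorem pv_main (p : List Char) (ls : List (List Char)) : ∀ out,
    (((ls.foldl (pvStepA p) (out, false, false, 0)).1,
       (ls.foldl (pvStepA p) (out, false, false, 0)).2.1) : List (List Char) × Bool) =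
    (match ls.findIdx? (fun l => PySem.Chars.startswith l p) with
     | none => (out ++ ls, false)
     | some i =>
       (out ++ (ls.take i ++ ls.drop (pvBlockEnd (pvBal (ls.getD i [])) i (ls.drop (i + 1)) + 1)),
        true)) := by
  induction ls with
  | nil => intro out; simp
  | cons l rest ih =>
    intro out
    by_cases hm : PySem.Chars.startswith l p = true
    · -- head matches: i = 0
      have hf : (l :: rest).findIdx? (fun l => PySem.Chars.startswith l p) = some 0 := by
        simp [List.findIdx?_cons, hm]
      by_cases hd : 0 < pvBal l
      · have hs := pvA_skip p rest out (pvBal l) hd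
        have hsh : pvBlockEnd (pvBal l) 0 (rest) = pvBlockEnd (pvBal l) 0 rest := rfl
        simp only [List.foldl_cons, pvStepA, if_neg (by simp : ¬ (false = true)),
          Bool.not_false, Bool.true_and, hm, decide_eq_true hd] at *
        simp [hf, hs.1, hs.2, List.drop_succ_cons]
      · have hdone := pvA_done p rest out false (pvBal l) rfl
        have hne : decide (0 < pvBal l) = false := by simpa using hd
        simp only [List.foldl_cons, pvStepA, if_neg (by simp : ¬ (false = true)),
          Bool.not_false, Bool.true_and, hm, hne] at *
        have hbe : pvBlockEnd (pvBal l) 0 (rest) = 0 := by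
          cases rest with
          | nil => rfl
          | cons m r => simp [pvBlockEnd, hd]
        simp [hf, hdone, hbe, List.drop_succ_cons]
    · -- head does not match: copy the line and recurse
      have hf : (l :: rest).findIdx? (fun l => PySem.Chars.startswith l p) =
          (rest.findIdx? (fun l => PySem.Chars.startswith l p)).map (· + 1) := by
        simp [List.findIdx?_cons, hm]
      have := ih (out ++ [l])
      simp only [List.foldl_cons, pvStepA, hm,
        Bool.not_false, Bool.true_and, if_neg (by simp : ¬ (false = true))] at *
      rw [hf]
      cases hrest : rest.findIdx? (fun l => PySem.Chars.startswith l p) with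
      | none => simp [hrest] at this; simp [this]
      | some i =>
        simp only [hrest, Option.map_some] at this ⊢
        have hsh : pvBlockEnd (pvBal (rest.getD i [])) (i + 1) (rest.drop (i + 1)) =
            pvBlockEnd (pvBal (rest.getD i [])) i (rest.drop (i + 1)) + 1 := by
          simpa using pvBlockEnd_shift (rest.drop (i + 1)) (pvBal (rest.getD i [])) i 1
        simp [this, List.getD, List.drop_succ_cons, List.take_succ_cons]
        simp only [List.getD] at hsh
        rw [hsh]

-- ===== VERDICT (by name: the statement is the Claim_ definition above) =====
theorem remove_first_import_with_prefix_py_spec : Claim_equal_remove_first_import_with_prefix_py := by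
  intro src prefix_ _
  unfold Spec_remove_first_import_with_prefix_py
  unfold remove_first_import_with_prefix_py remove_first_import_with_prefix_py_alt
  have h := pv_main prefix_.toList (pvSplitKeep src.toList) []
  cases hf : (pvSplitKeep src.toList).findIdx? (fun l => PySem.Chars.startswith l prefix_.toList) with
  | none =>
    simp only [hf] at h
    have h1 := congrArg Prod.fst h
    have h2 := congrArg (fun x => x.2) h
    simp at h1 h2
    simp [hf, h1, h2, pv_join_nil_eq_flatten, pv_splitKeep_flatten,
      String.ofList_toList]
  | some i =>
    simp only [hf] at h
    have h1 := congrArg Prod.fst h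
    have h2 := congrArg (fun x => x.2) h
    simp at h1 h2
    simp [hf, h1, h2]
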